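-- pv_equiv track=rewrite | github.com/DanielBraga04/symphonia_tcc | biblioteca/processamento_imagem.py | similarImagem
-- ===== SOURCE A (Python) =====
-- def inverter_valor(valor):
--     if valor == 0: # Se o valor for 0 (preto), retorna 1
--         return 1
--     else: # Se o valor for diferente de 0 (branco), retorna 0
--         return 0
--
-- def similarImagem(imagem, ordemAleatoria, nBits):
--
--     int_values = []
--
--     # Converter cada grupo de nBits em um número inteiro
--     current_value = 0
--     bits_count = 0
--     for i, pixel in enumerate(ordemAleatoria):
--         valor_invertido = inverter_valor(imagem[pixel])
--         # Adicionar o bit invertido ao valor atual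
--         current_value = (current_value << 1) | valor_invertido
--         bits_count += 1
--         # Se atingirmos o número de bits necessário, adicione o valor inteiro à lista
--         if bits_count == nBits:
--             int_values.append(current_value)
--             current_value = 0
--             bits_count = 0
--
--     return int_values
-- ===== SOURCE B (Python) =====
-- def similarImagem(imagem, ordemAleatoria, nBits):
--     # Two phases: first invert every referenced pixel into a flat bit list,
--     # then slice that list into complete nBits-sized chunks and convert each
--     # chunk to an integer.
--     bits = [1 if imagem[pixel] == 0 else 0 for pixel in ordemAleatoria]
--     if nBits <= 0:
--         return []
--     int_values = []
--     while len(bits) >= nBits: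
--         chunk, bits = bits[:nBits], bits[nBits:]
--         value = 0
--         for bit in chunk:
--             value = value * 2 + bit
--         int_values.append(value)
--     return int_values
-- ===== Notes on version B (the rewrite author's own statement) =====
-- stated objective: alternative
-- what changed: Replaces A's single flat loop with a mod-nBits bit counter and accumulator by a two-phase chunk-then-convert structure: first build the whole inverted-bit list with a comprehension, then slice it into complete nBits-sized chunks and pack each chunk with an inner loop; an explicit nBits <= 0 guard replaces A's counter never matching.
import Mathlib
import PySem

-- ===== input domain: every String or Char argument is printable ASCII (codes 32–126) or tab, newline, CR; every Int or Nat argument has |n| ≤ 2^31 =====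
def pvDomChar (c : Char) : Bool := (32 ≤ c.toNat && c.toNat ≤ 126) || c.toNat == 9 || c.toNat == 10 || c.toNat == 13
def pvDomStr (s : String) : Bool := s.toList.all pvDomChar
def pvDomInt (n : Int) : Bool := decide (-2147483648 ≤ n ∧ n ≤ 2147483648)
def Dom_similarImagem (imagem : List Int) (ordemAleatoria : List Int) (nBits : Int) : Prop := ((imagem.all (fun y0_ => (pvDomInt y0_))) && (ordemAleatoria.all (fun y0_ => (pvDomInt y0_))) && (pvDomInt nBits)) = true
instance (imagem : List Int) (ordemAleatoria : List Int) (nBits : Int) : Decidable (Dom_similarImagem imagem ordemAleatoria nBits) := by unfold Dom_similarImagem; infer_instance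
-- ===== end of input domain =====

-- B replaces A's flat mod-nBits bit-counter loop by a chunk-then-convert structure
-- (slice off complete nBits groups, pack each slice): a different decomposition, same cost.

-- ===== PORT A =====
def inverter_valor (valor : Int) : Int :=
  if valor == 0 then 1 else 0

-- the loop body of A's for-loop over ordemAleatoria; state = (int_values, current_value, bits_count)
-- (the enumerate index i is unused in A); imagem[pixel] = pyGetD (in range under Pre_);
-- (current_value << 1) | bit written as current_value * 2 + bit, exact since current_value ≥ 0 and bit ∈ {0,1}
def stepA (imagem : List Int) (nBits : Int) (s : List Int × Int × Int) (pixel : Int) : List Int × Int × Int :=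
  let valor_invertido := inverter_valor (PySem.List.pyGetD imagem pixel 0)
  let current_value := s.2.1 * 2 + valor_invertido
  let bits_count := s.2.2 + 1
  if bits_count == nBits then (s.1 ++ [current_value], 0, 0)
  else (s.1, current_value, bits_count)

def similarImagem (imagem : List Int) (ordemAleatoria : List Int) (nBits : Int) : List Int :=
  (ordemAleatoria.foldl (stepA imagem nBits) ([], 0, 0)).1

-- ===== PORT B =====
-- phase 1 of B: the inverted-bit list (the comprehension over ordemAleatoria)
def bitList (imagem : List Int) (ordemAleatoria : List Int) : List Int :=
  ordemAleatoria.map (fun pixel => if PySem.List.pyGetD imagem pixel 0 == 0 then (1 : Int) else 0)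

-- inner for-loop of B: convert one chunk of bits to an integer
def packChunk (chunk : List Int) : Int :=
  chunk.foldl (fun value bit => value * 2 + bit) 0

-- B's while-loop (fuel = initial bit-list length bounds the iteration count, since each
-- step drops n ≥ 1 bits); bits[:n] / bits[n:] are the Python slices
def chunkLoop (n : Nat) : Nat → List Int → List Int
  | 0, _ => []
  | fuel + 1, bits =>
    if 0 < n ∧ n ≤ bits.length then
      packChunk (PySem.List.slice bits none (some (n : Int))) ::
        chunkLoop n fuel (PySem.List.slice bits (some (n : Int)) none)
    else []

def similarImagem_alt (imagem : List Int) (ordemAleatoria : List Int) (nBits : Int) : List Int :=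
  let bits := bitList imagem ordemAleatoria
  if nBits ≤ 0 then [] else chunkLoop nBits.toNat bits.length bits

-- ===== PRECONDITION & SPEC =====
-- Pre_ excludes exactly the inputs where Python A raises IndexError: some pixel index out of range.
def Pre_similarImagem (imagem : List Int) (ordemAleatoria : List Int) (nBits : Int) : Prop :=
  ∀ p ∈ ordemAleatoria, -(imagem.length : Int) ≤ p ∧ p < (imagem.length : Int)
instance (imagem : List Int) (ordemAleatoria : List Int) (nBits : Int) : Decidable (Pre_similarImagem imagem ordemAleatoria nBits) := by unfold Pre_similarImagem; infer_instance

def pvWitness_similarImagem : List Int × List Int × Int := ([0, 255], [0, 1, -1, 0], 2)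

def Spec_similarImagem (imagem : List Int) (ordemAleatoria : List Int) (nBits : Int) (out : List Int) : Prop := out = similarImagem_alt imagem ordemAleatoria nBits
instance (imagem : List Int) (ordemAleatoria : List Int) (nBits : Int) (out : List Int) : Decidable (Spec_similarImagem imagem ordemAleatoria nBits out) := by unfold Spec_similarImagem; infer_instance

-- ===== CLAIM (what is proved, stated in full; the proofs are below) =====
def Claim_equal_similarImagem : Prop := ∀ (imagem : List Int) (ordemAleatoria : List Int) (nBits : Int), Dom_similarImagem imagem ordemAleatoria nBits → Pre_similarImagem imagem ordemAleatoria nBits → Spec_similarImagem imagem ordemAleatoria nBits (similarImagem imagem ordemAleatoria nBits)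

-- ===== LEMMAS AND PROOFS =====

-- A's step, rephrased as a function of the inverted bit rather than the pixel
def stepBit (nBits : Int) (s : List Int × Int × Int) (bit : Int) : List Int × Int × Int :=
  if s.2.2 + 1 == nBits then (s.1 ++ [s.2.1 * 2 + bit], 0, 0)
  else (s.1, s.2.1 * 2 + bit, s.2.2 + 1)

-- A's fold over the pixels is the bit-step fold over B's bit list
lemma foldA_eq_foldBit (imagem : List Int) (nBits : Int) (l : List Int)
    (s : List Int × Int × Int) :
    l.foldl (stepA imagem nBits) s = (bitList imagem l).foldl (stepBit nBits) s := by
  rw [bitList, List.foldl_map]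
  rfl

-- A's loop never appends when nBits ≤ 0: the counter stays positive
lemma foldBit_nonpos (nBits : Int) (h : nBits ≤ 0) :
    ∀ (bl : List Int) (acc : List Int) (cur cnt : Int), 0 ≤ cnt →
      (bl.foldl (stepBit nBits) (acc, cur, cnt)).1 = acc := by
  intro bl
  induction bl with
  | nil => intro acc cur cnt _; rfl
  | cons b rest ih =>
    intro acc cur cnt hcnt
    have hne : ¬ (cnt + 1 = nBits) := by omega
    simp only [List.foldl_cons, stepBit, beq_iff_eq, hne, if_false]
    exact ih acc _ (cnt + 1) (by omega)

-- A's loop on fewer bits than needed only accumulates into current_value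
lemma foldBit_short (nBits : Int) :
    ∀ (bl : List Int) (acc : List Int) (cur cnt : Int), 0 ≤ cnt →
      cnt + bl.length < nBits →
      bl.foldl (stepBit nBits) (acc, cur, cnt) =
        (acc, bl.foldl (fun value bit => value * 2 + bit) cur, cnt + bl.length) := by
  intro bl
  induction bl with
  | nil => intro acc cur cnt _ _; simp
  | cons b rest ih =>
    intro acc cur cnt hcnt hlt
    have hne : ¬ (cnt + 1 = nBits) := by simp at hlt ⊢; omega
    simp only [List.foldl_cons, stepBit, beq_iff_eq, hne, if_false]
    rw [ih acc (cur * 2 + b) (cnt + 1) (by omega) (by simp at hlt ⊢; omega)]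
    simp
    omega

-- A's loop on exactly the missing number of bits appends the packed value and resets
lemma foldBit_exact (nBits : Int) :
    ∀ (bl : List Int) (acc : List Int) (cur cnt : Int), 0 ≤ cnt →
      cnt + bl.length = nBits → 0 < bl.length →
      bl.foldl (stepBit nBits) (acc, cur, cnt) =
        (acc ++ [bl.foldl (fun value bit => value * 2 + bit) cur], 0, 0) := by
  intro bl
  induction bl with
  | nil => intro _ _ _ _ _ h; simp at h
  | cons b rest ih =>
    intro acc cur cnt hcnt heq _
    by_cases hrest : rest = []
    · subst hrest
      have : (cnt + 1 = nBits) := by simp at heq; omega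
      simp [stepBit, this]
    · have hne : ¬ (cnt + 1 = nBits) := by
        have : 0 < rest.length := List.length_pos_iff.mpr hrest
        simp at heq; omega
      simp only [List.foldl_cons, stepBit, beq_iff_eq, hne, if_false]
      rw [ih acc (cur * 2 + b) (cnt + 1) (by omega) (by simp at heq ⊢; omega)
        (List.length_pos_iff.mpr hrest)]

-- one unfolding step of chunkLoop, slices replaced by take/drop
lemma chunkLoop_succ (n : Nat) (fuel : Nat) (bits : List Int) :
    chunkLoop n (fuel + 1) bits =
      if 0 < n ∧ n ≤ bits.length then
        packChunk (bits.take n) :: chunkLoop n fuel (bits.drop n)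
      else [] := by
  rw [chunkLoop]
  simp [PySem.List.slice_to_natCast, PySem.List.slice_from_natCast]

-- main invariant: A's fresh-state loop equals B's chunk loop (0 < nBits, enough fuel)
lemma main_lemma (nBits : Int) (hpos : 0 < nBits) :
    ∀ (k : Nat) (bl acc : List Int), bl.length ≤ k →
      (bl.foldl (stepBit nBits) (acc, 0, 0)).1 = acc ++ chunkLoop nBits.toNat k bl := by
  intro k
  induction k with
  | zero =>
    intro bl acc hk
    have : bl = [] := List.eq_nil_of_length_eq_zero (by omega)
    subst this
    simp [chunkLoop]
  | succ k ih =>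
    intro bl acc hk
    rw [chunkLoop_succ]
    by_cases hlen : nBits.toNat ≤ bl.length
    · have hn0 : 0 < nBits.toNat := by omega
      simp only [hn0, hlen, and_self, if_pos]
      conv_lhs => rw [(List.take_append_drop nBits.toNat bl).symm]
      rw [List.foldl_append]
      rw [foldBit_exact nBits (bl.take nBits.toNat) acc 0 0 le_rfl
        (by simp [List.length_take]; omega)
        (by simp [List.length_take]; omega)]
      rw [ih (bl.drop nBits.toNat) _ (by simp [List.length_drop]; omega)]
      simp [packChunk]
    · have hcond : ¬ (0 < nBits.toNat ∧ nBits.toNat ≤ bl.length) := by omega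
      simp only [hcond, if_false, List.append_nil]
      have hlt : (0 : Int) + bl.length < nBits := by
        have : (bl.length : Int) < nBits.toNat := by exact_mod_cast Nat.lt_of_not_le hlen
        omega
      rw [foldBit_short nBits bl acc 0 0 le_rfl hlt]

-- ===== VERDICT (by name: the statement is the Claim_ definition above) =====
theorem similarImagem_spec : Claim_equal_similarImagem := by
  intro imagem ordem nBits _ _
  unfold Spec_similarImagem similarImagem similarImagem_alt
  rw [foldA_eq_foldBit]
  by_cases h : nBits ≤ 0
  · simp only [h, if_pos]
    exact foldBit_nonpos nBits h (bitList imagem ordem) [] 0 0 le_rfl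
  · simp only [h, if_false]
    have := main_lemma nBits (by omega) (bitList imagem ordem).length
      (bitList imagem ordem) [] le_rfl
    simpa using this
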